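-- pv_equiv track=rewrite | github.com/sudoshivesh/niet-codetantra | Competitive Coding - 2021/3. Problems on Mathematics/CTP30427.py | isDivisibleBy41
-- ===== SOURCE A (Python) =====
-- def isDivisibleBy41(d1, d2, c, L):
-- 	digits = [d1,d2]+[0]*(L-2)
-- 	for i in range(2,L):
-- 		digits[i] = (digits[i-1]*c+digits[i-2])%10
-- 	num = 0
-- 	for i in range(L):
-- 		num += digits[i]*10**(L-i-1)
-- 	return num%41==0
-- ===== SOURCE B (Python) =====
-- def isDivisibleBy41(d1, d2, c, L):
--     # One pass: generate each digit from the recurrence and fold it into a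
--     # running remainder mod 41 (Horner), never building the big integer.
--     if L <= 0:
--         return True
--     r = d1 % 41
--     if L >= 2:
--         r = (r * 10 + d2) % 41
--         p2, p1 = d1, d2
--         for _ in range(L - 2):
--             p2, p1 = p1, (p1 * c + p2) % 10
--             r = (r * 10 + p1) % 41
--     return r == 0
-- ===== Notes on version B (the rewrite author's own statement) =====
-- stated objective: faster
-- what changed: Instead of materialising the whole digit list and summing digit*10^(L-i-1) into one huge integer before taking % 41, B keeps only the last two digits of the recurrence and folds each digit into a running Horner remainder mod 41 in a single pass.
import Mathlib
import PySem

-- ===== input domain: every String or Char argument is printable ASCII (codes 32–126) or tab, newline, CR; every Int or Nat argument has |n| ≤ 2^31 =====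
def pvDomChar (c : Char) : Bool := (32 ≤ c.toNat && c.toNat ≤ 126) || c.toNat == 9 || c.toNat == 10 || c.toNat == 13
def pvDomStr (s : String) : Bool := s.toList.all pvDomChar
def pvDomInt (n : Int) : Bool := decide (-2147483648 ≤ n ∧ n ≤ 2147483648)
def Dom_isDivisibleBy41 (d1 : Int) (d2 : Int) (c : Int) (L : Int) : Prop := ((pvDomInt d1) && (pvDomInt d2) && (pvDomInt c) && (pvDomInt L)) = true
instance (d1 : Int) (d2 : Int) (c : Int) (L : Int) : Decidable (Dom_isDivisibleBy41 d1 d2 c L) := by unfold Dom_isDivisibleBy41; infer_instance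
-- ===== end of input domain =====

-- ===== PORT A =====
-- B accumulates the recurrence and the value mod 41 in one pass instead of building the full integer.
def isDivisibleBy41 (d1 : Int) (d2 : Int) (c : Int) (L : Int) : Bool :=
  let digits0 : List Int := [d1, d2] ++ List.replicate (L - 2).toNat 0
  let digits := (PySem.List.pyRange 2 L 1).foldl
    (fun ds i => PySem.List.pySetD ds i
      (PySem.Int.mod (PySem.List.pyGetD ds (i - 1) 0 * c + PySem.List.pyGetD ds (i - 2) 0) 10))
    digits0
  let num := (PySem.List.pyRange 0 L 1).foldl
    (fun acc i => acc + PySem.List.pyGetD digits i 0 * 10 ^ (L - i - 1).toNat) 0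
  PySem.Int.mod num 41 == 0

-- ===== PORT B =====
def altLoop (n : Nat) (c : Int) (p2 : Int) (p1 : Int) (r : Int) : Int :=
  match n with
  | 0 => r
  | n + 1 =>
      let d := PySem.Int.mod (p1 * c + p2) 10
      altLoop n c p1 d (PySem.Int.mod (r * 10 + d) 41)

def isDivisibleBy41_alt (d1 : Int) (d2 : Int) (c : Int) (L : Int) : Bool :=
  if L <= 0 then true
  else
    let r := PySem.Int.mod d1 41
    let r := if 2 <= L then altLoop (L - 2).toNat c d1 d2 (PySem.Int.mod (r * 10 + d2) 41) else r
    r == 0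

-- ===== PRECONDITION & SPEC =====
def Spec_isDivisibleBy41 (d1 : Int) (d2 : Int) (c : Int) (L : Int) (out : Bool) : Prop := out = isDivisibleBy41_alt d1 d2 c L
instance (d1 : Int) (d2 : Int) (c : Int) (L : Int) (out : Bool) : Decidable (Spec_isDivisibleBy41 d1 d2 c L out) := by unfold Spec_isDivisibleBy41; infer_instance

-- ===== CLAIM (what is proved, stated in full; the proofs are below) =====
def Claim_equal_isDivisibleBy41 : Prop := ∀ (d1 : Int) (d2 : Int) (c : Int) (L : Int), Dom_isDivisibleBy41 d1 d2 c L → Spec_isDivisibleBy41 d1 d2 c L (isDivisibleBy41 d1 d2 c L)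

-- ===== LEMMAS AND PROOFS =====

-- the digit sequence both programs generate
def seq (d1 d2 c : Int) : Nat → Int
  | 0 => d1
  | 1 => d2
  | n + 2 => PySem.Int.mod (seq d1 d2 c (n + 1) * c + seq d1 d2 c n) 10

-- Horner remainders mod 41
def H (d1 d2 c : Int) : Nat → Int
  | 0 => PySem.Int.mod d1 41
  | k + 1 => PySem.Int.mod (H d1 d2 c k * 10 + seq d1 d2 c (k + 1)) 41

-- partial big-integer values
def S (d1 d2 c : Int) (k : Nat) : Int :=
  ((List.range (k + 1)).map (fun i => seq d1 d2 c i * 10 ^ (k - i))).sum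

theorem S_succ (d1 d2 c : Int) (k : Nat) :
    S d1 d2 c (k + 1) = S d1 d2 c k * 10 + seq d1 d2 c (k + 1) := by
  unfold S
  rw [List.range_succ]
  simp only [List.map_append, List.sum_append, List.map_cons, List.map_nil,
    List.sum_cons, List.sum_nil, Nat.sub_self, pow_zero, mul_one, add_zero]
  have hmap : (List.range (k + 1)).map (fun i => seq d1 d2 c i * 10 ^ (k + 1 - i))
      = (List.range (k + 1)).map (fun i => (seq d1 d2 c i * 10 ^ (k - i)) * 10) := by
    apply List.map_congr_left
    intro i hi
    have hik : i ≤ k := by have := List.mem_range.mp hi; omega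
    have h1 : k + 1 - i = (k - i) + 1 := by omega
    rw [h1, pow_succ]; ring
  rw [hmap, List.sum_map_mul_right]

theorem H_eq_mod_S (d1 d2 c : Int) (k : Nat) :
    H d1 d2 c k = PySem.Int.mod (S d1 d2 c k) 41 := by
  induction k with
  | zero => simp [H, S, seq]
  | succ k ih =>
    have h41 : (0:Int) < 41 := by norm_num
    rw [show H d1 d2 c (k + 1) = PySem.Int.mod (H d1 d2 c k * 10 + seq d1 d2 c (k + 1)) 41 from rfl,
      ih, S_succ, PySem.Int.mod_eq_emod_of_pos h41, PySem.Int.mod_eq_emod_of_pos h41,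
      PySem.Int.mod_eq_emod_of_pos h41]
    omega

theorem foldA_char (d1 d2 c : Int) (n j : Nat) (hj : j ≤ n) :
    ((PySem.List.pyRange 2 (2 + (j : Int)) 1).foldl
      (fun ds i => PySem.List.pySetD ds i
        (PySem.Int.mod (PySem.List.pyGetD ds (i - 1) 0 * c + PySem.List.pyGetD ds (i - 2) 0) 10))
      ([d1, d2] ++ List.replicate n 0)).length = n + 2 ∧ ∀ m : Nat, m < n + 2 →
      ((PySem.List.pyRange 2 (2 + (j : Int)) 1).foldl
      (fun ds i => PySem.List.pySetD ds i
        (PySem.Int.mod (PySem.List.pyGetD ds (i - 1) 0 * c + PySem.List.pyGetD ds (i - 2) 0) 10))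
      ([d1, d2] ++ List.replicate n 0)).getD m 0 = if m < j + 2 then seq d1 d2 c m else 0 := by
  induction j with
  | zero =>
    rw [show ((2:Int) + (0:Nat)) = 2 by norm_num, PySem.List.pyRange_one_eq_nil le_rfl]
    simp only [List.foldl_nil]
    refine ⟨by simp, ?_⟩
    intro m hm
    match m with
    | 0 => simp [seq, List.getD]
    | 1 => simp [seq, List.getD]
    | m + 2 =>
      have : ¬ (m + 2 < 0 + 2) := by omega
      simp only [this, if_false]
      simp [List.getD]
  | succ j ih =>
    obtain ⟨hlen, hchar⟩ := ih (by omega)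
    have hcast : ((2:Int) + ((j:Nat)+1 : Nat)) = (2 + (j:Int)) + 1 := by push_cast; ring
    rw [hcast, PySem.List.pyRange_one_succ_right (by omega), List.foldl_append]
    simp only [List.foldl_cons, List.foldl_nil]
    set ds := (PySem.List.pyRange 2 (2 + (j : Int)) 1).foldl
      (fun ds i => PySem.List.pySetD ds i
        (PySem.Int.mod (PySem.List.pyGetD ds (i - 1) 0 * c + PySem.List.pyGetD ds (i - 2) 0) 10))
      ([d1, d2] ++ List.replicate n 0) with hds
    have hg1 : PySem.List.pyGetD ds ((2 + (j:Int)) - 1) 0 = seq d1 d2 c (j + 1) := by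
      rw [show (2 + (j:Int)) - 1 = ((j + 1 : Nat) : Int) by push_cast; ring,
        PySem.List.pyGetD_natCast, hchar (j+1) (by omega)]
      simp
    have hg2 : PySem.List.pyGetD ds ((2 + (j:Int)) - 2) 0 = seq d1 d2 c j := by
      rw [show (2 + (j:Int)) - 2 = ((j : Nat) : Int) by ring,
        PySem.List.pyGetD_natCast, hchar j (by omega)]
      simp
    rw [hg1, hg2]
    have hv : PySem.Int.mod (seq d1 d2 c (j + 1) * c + seq d1 d2 c j) 10 = seq d1 d2 c (j + 2) := by
      rfl
    rw [hv, show (2 + (j:Int)) = ((j + 2 : Nat) : Int) by push_cast; ring,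
      PySem.List.pySetD_natCast]
    refine ⟨by simp [hlen], ?_⟩
    intro m hm
    rw [List.getD_eq_getElem?_getD, List.getElem?_set]
    by_cases hmj : j + 2 = m
    · subst hmj
      rw [if_pos rfl, if_pos (by omega : j + 2 < ds.length), if_pos (by omega)]
      simp
    · rw [if_neg hmj, ← List.getD_eq_getElem?_getD, hchar m hm]
      by_cases h1 : m < j + 2
      · rw [if_pos h1, if_pos (by omega)]
      · rw [if_neg h1, if_neg (by omega)]

theorem altLoop_char (d1 d2 c : Int) (k : Nat) : ∀ (j : Nat),
    altLoop k c (seq d1 d2 c j) (seq d1 d2 c (j + 1)) (H d1 d2 c (j + 1)) = H d1 d2 c (k + j + 1) := by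
  induction k with
  | zero => intro j; simp [altLoop]
  | succ k ih =>
    intro j
    show altLoop k c (seq d1 d2 c (j+1))
      (PySem.Int.mod (seq d1 d2 c (j + 1) * c + seq d1 d2 c j) 10)
      (PySem.Int.mod (H d1 d2 c (j + 1) * 10 +
        PySem.Int.mod (seq d1 d2 c (j + 1) * c + seq d1 d2 c j) 10) 41) = _
    have hd : PySem.Int.mod (seq d1 d2 c (j + 1) * c + seq d1 d2 c j) 10 = seq d1 d2 c (j + 2) := rfl
    rw [hd]
    have hr : PySem.Int.mod (H d1 d2 c (j + 1) * 10 + seq d1 d2 c (j + 2)) 41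
        = H d1 d2 c (j + 2) := rfl
    rw [hr]
    have := ih (j + 1)
    rw [show k + 1 + j + 1 = k + (j + 1) + 1 by omega]
    exact this

theorem foldl_add_map {α : Type} (f : α → Int) (l : List α) (init : Int) :
    l.foldl (fun a x => a + f x) init = init + (l.map f).sum := by
  induction l generalizing init with
  | nil => simp
  | cons x xs ih => simp [List.foldl_cons, ih]; ring

-- ===== VERDICT (by name: the statement is the Claim_ definition above) =====
theorem isDivisibleBy41_spec : Claim_equal_isDivisibleBy41 := by
  intro d1 d2 c L _hdom
  unfold Spec_isDivisibleBy41 isDivisibleBy41 isDivisibleBy41_alt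
  by_cases hL : L ≤ 0
  · rw [PySem.List.pyRange_one_eq_nil (by omega : L ≤ (2:Int)),
      PySem.List.pyRange_one_eq_nil (by omega : L ≤ (0:Int))]
    simp [hL, PySem.Int.mod]
  · by_cases hL2 : L < 2
    · -- L = 1
      have hL1 : L = 1 := by omega
      subst hL1
      rw [PySem.List.pyRange_one_eq_nil (by norm_num : (1:Int) ≤ 2),
        show PySem.List.pyRange 0 1 1 = [0] from rfl]
      simp [List.foldl_nil, List.foldl_cons, PySem.List.pyGetD]
    · -- L ≥ 2 : L = n + 2
      obtain ⟨n, hn⟩ : ∃ n : Nat, L = (n : Int) + 2 := ⟨(L - 2).toNat, by omega⟩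
      subst hn
      obtain ⟨hlen, hchar⟩ := foldA_char d1 d2 c n n le_rfl
      rw [show ((n:Int) + 2 - 2).toNat = n by omega,
        show (n:Int) + 2 = 2 + (n:Int) by ring] at *
      simp only []
      set ds := (PySem.List.pyRange 2 (2 + (n : Int)) 1).foldl
        (fun ds i => PySem.List.pySetD ds i
          (PySem.Int.mod (PySem.List.pyGetD ds (i - 1) 0 * c + PySem.List.pyGetD ds (i - 2) 0) 10))
        ([d1, d2] ++ List.replicate n 0) with hds
      -- the num fold equals S (n+1)
      have hnum : (PySem.List.pyRange 0 (2 + (n:Int)) 1).foldl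
          (fun acc i => acc + PySem.List.pyGetD ds i 0 * 10 ^ ((2 + (n:Int)) - i - 1).toNat) 0
          = S d1 d2 c (n + 1) := by
        rw [show (2 + (n:Int)) = ((n + 2 : Nat) : Int) by push_cast; ring,
          PySem.List.pyRange_zero_nat, List.foldl_map, foldl_add_map]
        have hmap : (List.range (n + 2)).map
            (fun i => PySem.List.pyGetD ds ((i:Nat):Int) 0 * 10 ^ ((((n+2:Nat)):Int) - (i:Nat) - 1).toNat)
            = (List.range (n + 2)).map (fun i => seq d1 d2 c i * 10 ^ ((n + 1) - i)) := by
          apply List.map_congr_left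
          intro i hi
          have hi2 : i < n + 2 := List.mem_range.mp hi
          rw [PySem.List.pyGetD_natCast, hchar i hi2, if_pos (by omega),
            show ((((n+2:Nat)):Int) - (i:Nat) - 1).toNat = (n + 1) - i by omega]
        rw [hmap]
        simp [S]
      rw [hnum]
      -- A's result
      have hA : (PySem.Int.mod (S d1 d2 c (n + 1)) 41 == 0) = (H d1 d2 c (n + 1) == 0) := by
        rw [H_eq_mod_S]
      rw [hA]
      -- B's side
      have h1 : PySem.Int.mod (PySem.Int.mod d1 41 * 10 + d2) 41 = H d1 d2 c 1 := rfl
      rw [h1]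
      have := altLoop_char d1 d2 c n 0
      simp only [seq] at this
      rw [show n + 0 + 1 = n + 1 by omega] at this
      rw [this]
      rw [if_neg hL, if_pos (by omega : (2:Int) ≤ 2 + (n:Int))]
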